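-- pv_equiv track=rewrite | github.com/maranavard/SISTEMA-COMPUTACIONAL-PARA-LA-GESTION-Y-CONTROL-DE-ACCESO-DE-AUTOMOVILES-M-DULO-WEB | python/webapp/app/models/horario.py | _parse_dias_activos
-- ===== SOURCE A (Python) =====
-- def _parse_dias_activos(raw: str) -> list[int]:
--     values: list[int] = []
--     for part in (raw or "").split(","):
--         item = part.strip()
--         if not item:
--             continue
--         try:
--             day = int(item)
--         except ValueError:
--             continue
--         if 0 <= day <= 6 and day not in values:
--             values.append(day)
--     return sorted(values)
-- ===== SOURCE B (Python) =====
-- def _parse_dias_activos(raw: str) -> list[int]: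
--     parsed = set()
--     for part in (raw or "").split(","):
--         try:
--             parsed.add(int(part))
--         except ValueError:
--             pass
--     return [d for d in range(7) if d in parsed]
-- ===== Notes on version B (the rewrite author's own statement) =====
-- stated objective: simpler
-- what changed: B drops A's per-token strip/empty checks and range guard (int() already strips whitespace and raises on empty), collects every parsed integer into a set in one bare try/int/add pass, and builds the result by enumerating range(7) against that set, so uniqueness, the 0-6 bound and sorted order all come from the output-side enumeration instead of A's membership-guarded accumulator plus sorted().
import Mathlib
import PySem

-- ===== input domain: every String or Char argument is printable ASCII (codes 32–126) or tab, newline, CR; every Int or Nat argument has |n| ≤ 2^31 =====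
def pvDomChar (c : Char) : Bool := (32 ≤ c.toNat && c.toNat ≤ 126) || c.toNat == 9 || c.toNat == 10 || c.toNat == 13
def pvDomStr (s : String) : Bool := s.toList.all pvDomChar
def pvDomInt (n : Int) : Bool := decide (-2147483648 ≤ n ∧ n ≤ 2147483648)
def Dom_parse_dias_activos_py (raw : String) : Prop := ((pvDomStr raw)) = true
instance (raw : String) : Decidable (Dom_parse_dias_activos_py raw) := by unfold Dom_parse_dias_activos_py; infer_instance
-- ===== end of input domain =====

-- B drops A's per-token strip/empty/range checks (int() itself strips whitespace and raises
-- on empty), collects every parsed integer into a set, and reads the answer off by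
-- enumerating range(7) against that set (objective: simpler).

-- ===== PORT A =====
def parse_dias_activos_py (raw : String) : List Int :=
  let values : List Int :=
    ((PySem.Str.split? raw ",").getD []).foldl (fun values part =>
      let item := PySem.Str.strip part
      if item = "" then values
      else
        match PySem.Int.ofStr? item with
        | none => values
        | some day =>
          if 0 ≤ day ∧ day ≤ 6 ∧ day ∉ values then values ++ [day] else values) []
  PySem.List.sorted values (fun x => x) false

-- ===== PORT B =====
def parse_dias_activos_py_alt (raw : String) : List Int :=
  let parsed : PySem.Set Int :=
    ((PySem.Str.split? raw ",").getD []).foldl (fun parsed part =>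
      match PySem.Int.ofStr? part with
      | none => parsed
      | some v => PySem.Set.add parsed v) PySem.Set.empty
  (PySem.List.pyRange 0 7 1).filter (fun d => decide (d ∈ parsed))

-- ===== PRECONDITION & SPEC =====
def Spec_parse_dias_activos_py (raw : String) (out : List Int) : Prop := out = parse_dias_activos_py_alt raw
instance (raw : String) (out : List Int) : Decidable (Spec_parse_dias_activos_py raw out) := by unfold Spec_parse_dias_activos_py; infer_instance

-- ===== CLAIM (what is proved, stated in full; the proofs are below) =====
def Claim_equal_parse_dias_activos_py : Prop := ∀ (raw : String), Dom_parse_dias_activos_py raw → Spec_parse_dias_activos_py raw (parse_dias_activos_py raw)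

-- ===== LEMMAS AND PROOFS =====

-- int(item) on a character equal to Python's str.isspace coincides with int()'s own space set
-- on the ASCII domain
theorem pvCharEq (c d : Char) : (c = d) ↔ (c.toNat = d.toNat) :=
  ⟨fun h => h ▸ rfl, fun h => Char.ext (UInt32.toNat_inj.mp h)⟩

theorem pv_isspace_eq {c : Char} (h : pvDomChar c = true) :
    PySem.Chars.isspace c = PySem.Int.isIntSpace c := by
  simp only [pvDomChar, Bool.or_eq_true, Bool.and_eq_true, decide_eq_true_eq, beq_iff_eq] at h
  simp only [PySem.Chars.isspace, PySem.Int.isIntSpace, pvCharEq]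
  by_cases h9 : c.toNat = 9 <;> by_cases h10 : c.toNat = 10 <;> by_cases h13 : c.toNat = 13 <;>
    by_cases h32 : c.toNat = 32 <;>
    simp_all <;> (rw [Bool.eq_iff_iff]; simp only [Bool.or_eq_true, Bool.and_eq_true, decide_eq_true_eq]; omega)

theorem pvDropWhile_congr {p q : Char → Bool} {l : List Char} (h : ∀ x ∈ l, p x = q x) :
    l.dropWhile p = l.dropWhile q := by
  induction l with
  | nil => rfl
  | cons a t ih =>
    have ha := h a (List.mem_cons_self)
    by_cases hp : p a
    · rw [List.dropWhile_cons_of_pos hp, List.dropWhile_cons_of_pos (ha ▸ hp),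
        ih (fun x hx => h x (List.mem_cons_of_mem _ hx))]
    · rw [List.dropWhile_cons_of_neg hp, List.dropWhile_cons_of_neg (ha ▸ hp)]

-- two-sided trim with predicate p (the trimming int() and str.strip both perform)
def pvStripP (p : Char → Bool) (l : List Char) : List Char :=
  ((l.dropWhile p).reverse.dropWhile p).reverse

theorem pvStripP_fix (p : Char → Bool) (l : List Char) :
    (pvStripP p l).dropWhile p = pvStripP p l := by
  unfold pvStripP
  set m := l.dropWhile p with hm
  rcases hX : (m.reverse.dropWhile p).reverse with _ | ⟨x, t⟩
  · simp
  · have hpref : (m.reverse.dropWhile p).reverse <+: m := by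
      have := List.dropWhile_suffix (l := m.reverse) p
      have := this.reverse
      simpa using this
    rw [hX] at hpref
    obtain ⟨s, hs⟩ := hpref
    have hs' : List.dropWhile p l = x :: (t ++ s) := by rw [← hm, ← hs]; simp
    have hpx : p x = false := by
      have := List.head_dropWhile_not p (l := l) (by rw [hs']; simp)
      simpa [hs'] using this
    rw [List.dropWhile_cons_of_neg (by simp [hpx])]

theorem pvStripP_idem (p : Char → Bool) (l : List Char) :
    pvStripP p (pvStripP p l) = pvStripP p l := by
  show (((pvStripP p l).dropWhile p).reverse.dropWhile p).reverse = _
  rw [pvStripP_fix]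
  show (((((l.dropWhile p).reverse.dropWhile p).reverse).reverse).dropWhile p).reverse = _
  rw [List.reverse_reverse, List.dropWhile_idempotent]
  rfl

theorem pvOfChars_strip (cs : List Char) :
    PySem.Int.ofChars? (pvStripP PySem.Int.isIntSpace cs) = PySem.Int.ofChars? cs := by
  have h := pvStripP_idem PySem.Int.isIntSpace cs
  unfold PySem.Int.ofChars?
  unfold pvStripP at h ⊢
  rw [h]

theorem pvStrip_eq_stripP {cs : List Char} (h : ∀ c ∈ cs, pvDomChar c = true) :
    PySem.Chars.strip cs = pvStripP PySem.Int.isIntSpace cs := by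
  unfold PySem.Chars.strip PySem.Chars.rstrip PySem.Chars.lstrip pvStripP
  rw [pvDropWhile_congr (fun x hx => pv_isspace_eq (h x hx))]
  rw [pvDropWhile_congr (fun x hx => pv_isspace_eq (h x
    ((List.dropWhile_sublist _).subset (List.mem_reverse.mp hx))))]

-- int(part.strip()) = int(part): int() strips the same whitespace itself (ASCII domain)
theorem pvOfStr_strip {part : String} (h : ∀ c ∈ part.toList, pvDomChar c = true) :
    PySem.Int.ofStr? (PySem.Str.strip part) = PySem.Int.ofStr? part := by
  rw [show PySem.Int.ofStr? (PySem.Str.strip part)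
      = PySem.Int.ofChars? (PySem.Str.strip part).toList from rfl,
    show PySem.Int.ofStr? part = PySem.Int.ofChars? part.toList from rfl,
    PySem.Str.toList_strip, pvStrip_eq_stripP h, pvOfChars_strip]

-- every character of a comma-split part comes from the original string
theorem pvSplitGo_subset (sep : List Char) (fuel : Nat) :
    ∀ (l cur : List Char) (acc : List (List Char)),
    ∀ part ∈ PySem.Chars.splitOn.go sep fuel l cur acc,
    ∀ c ∈ part, c ∈ l ∨ c ∈ cur ∨ ∃ p ∈ acc, c ∈ p := by
  induction fuel with
  | zero =>
    intro l cur acc part hpart c hc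
    rw [show PySem.Chars.splitOn.go sep 0 l cur acc = ((cur.reverse ++ l) :: acc).reverse
      from rfl] at hpart
    rw [List.mem_reverse, List.mem_cons] at hpart
    rcases hpart with rfl | hp
    · rcases List.mem_append.mp hc with h | h
      · exact Or.inr (Or.inl (List.mem_reverse.mp h))
      · exact Or.inl h
    · exact Or.inr (Or.inr ⟨part, hp, hc⟩)
  | succ fuel ih =>
    intro l cur acc part hpart c hc
    cases l with
    | nil =>
      rw [show PySem.Chars.splitOn.go sep (fuel+1) [] cur acc = (cur.reverse :: acc).reverse
        from rfl] at hpart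
      rw [List.mem_reverse, List.mem_cons] at hpart
      rcases hpart with rfl | hp
      · exact Or.inr (Or.inl (List.mem_reverse.mp hc))
      · exact Or.inr (Or.inr ⟨part, hp, hc⟩)
    | cons a rest =>
      rw [show PySem.Chars.splitOn.go sep (fuel+1) (a :: rest) cur acc
          = (if sep.isPrefixOf (a :: rest) then
              PySem.Chars.splitOn.go sep fuel (List.drop sep.length (a :: rest)) []
                (cur.reverse :: acc)
             else PySem.Chars.splitOn.go sep fuel rest (a :: cur) acc) from rfl] at hpart
      split at hpart
      · rcases ih _ _ _ part hpart c hc with h | h | ⟨p, hp, hcp⟩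
        · exact Or.inl (List.drop_subset _ _ h)
        · simp at h
        · rcases List.mem_cons.mp hp with rfl | hp'
          · exact Or.inr (Or.inl (List.mem_reverse.mp hcp))
          · exact Or.inr (Or.inr ⟨p, hp', hcp⟩)
      · rcases ih _ _ _ part hpart c hc with h | h | ⟨p, hp, hcp⟩
        · exact Or.inl (List.mem_cons_of_mem _ h)
        · rcases List.mem_cons.mp h with rfl | h'
          · exact Or.inl List.mem_cons_self
          · exact Or.inr (Or.inl h')
        · exact Or.inr (Or.inr ⟨p, hp, hcp⟩)

theorem pvSplit_part_subset {raw part : String}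
    (hpart : part ∈ (PySem.Str.split? raw ",").getD []) :
    ∀ c ∈ part.toList, c ∈ raw.toList := by
  intro c hc
  unfold PySem.Str.split? PySem.Chars.split? at hpart
  simp at hpart
  obtain ⟨cs, hcs, rfl⟩ := hpart
  unfold PySem.Chars.splitOn at hcs
  have := pvSplitGo_subset [','] (raw.toList.length + 1) raw.toList [] [] cs hcs c
    (by simpa using hc)
  simpa using this

-- the day A accepts from one token (if any): stripped, int(), range check
def pvParse1 (part : String) : Option Int :=
  match PySem.Int.ofStr? (PySem.Str.strip part) with
  | none => none
  | some day => if 0 ≤ day ∧ day ≤ 6 then some day else none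

theorem pvParse1_bounds {part : String} {d : Int} (h : pvParse1 part = some d) :
    0 ≤ d ∧ d ≤ 6 := by
  unfold pvParse1 at h
  rcases hm : PySem.Int.ofStr? (PySem.Str.strip part) with _ | day <;> rw [hm] at h
  · simp at h
  · by_cases hb : 0 ≤ day ∧ day ≤ 6 <;> simp [hb] at h
    omega

-- pvParse1 through B's parse: on Dom tokens, and for d in 0..6, they name the same token
set_option maxHeartbeats 1000000 in
theorem pvParse1_iff_ofStr {part : String} {d : Int}
    (hdom : ∀ c ∈ part.toList, pvDomChar c = true) (h0 : 0 ≤ d) (h6 : d ≤ 6) :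
    pvParse1 part = some d ↔ PySem.Int.ofStr? part = some d := by
  unfold pvParse1
  rw [← pvOfStr_strip hdom]
  rcases hm : PySem.Int.ofStr? (PySem.Str.strip part) with _ | day
  · simp
  · dsimp only
    by_cases hb : 0 ≤ day ∧ day ≤ 6
    · rw [if_pos hb]
    · rw [if_neg hb]
      constructor
      · intro h; cases h
      · intro h; injection h with h'; subst h'; exact absurd ⟨h0, h6⟩ hb

-- A's loop body, expressed through pvParse1
theorem pvStepA_eq (values : List Int) (part : String) :
    (let item := PySem.Str.strip part
     if item = "" then values
     else
       match PySem.Int.ofStr? item with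
       | none => values
       | some day =>
         if 0 ≤ day ∧ day ≤ 6 ∧ day ∉ values then values ++ [day] else values)
    = match pvParse1 part with
      | none => values
      | some d => if d ∈ values then values else values ++ [d] := by
  unfold pvParse1
  show (if PySem.Str.strip part = "" then values
     else
       match PySem.Int.ofStr? (PySem.Str.strip part) with
       | none => values
       | some day =>
         if 0 ≤ day ∧ day ≤ 6 ∧ day ∉ values then values ++ [day] else values) = _
  by_cases he : PySem.Str.strip part = ""
  · rw [if_pos he, he]
    have h0 : PySem.Int.ofStr? ("" : String) = none := by decide
    rw [h0]
  · rw [if_neg he]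
    rcases hm : PySem.Int.ofStr? (PySem.Str.strip part) with _ | day
    · rfl
    · dsimp only
      by_cases hb : 0 ≤ day ∧ day ≤ 6
      · rw [if_pos hb]
        by_cases hin : day ∈ values
        · have hn : ¬(0 ≤ day ∧ day ≤ 6 ∧ day ∉ values) := fun h => h.2.2 hin
          rw [if_neg hn]
          dsimp only
          rw [if_pos hin]
        · have hy : (0 ≤ day ∧ day ≤ 6 ∧ day ∉ values) := ⟨hb.1, hb.2, hin⟩
          rw [if_pos hy]
          dsimp only
          rw [if_neg hin]
      · have hn : ¬(0 ≤ day ∧ day ≤ 6 ∧ day ∉ values) := fun h => hb ⟨h.1, h.2.1⟩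
        rw [if_neg hn, if_neg hb]

theorem pvFoldA_mem (parts : List String) (vs : List Int) (x : Int) :
    x ∈ parts.foldl (fun values part =>
      match pvParse1 part with
      | none => values
      | some d => if d ∈ values then values else values ++ [d]) vs
    ↔ x ∈ vs ∨ ∃ part ∈ parts, pvParse1 part = some x := by
  induction parts generalizing vs with
  | nil => simp
  | cons p ps ih =>
    rw [List.foldl_cons]
    rcases hp : pvParse1 p with _ | d
    · dsimp only
      rw [ih]
      constructor
      · rintro (h | ⟨part, hpp, hps⟩)
        · exact Or.inl h
        · exact Or.inr ⟨part, List.mem_cons_of_mem _ hpp, hps⟩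
      · rintro (h | ⟨part, hpp, hps⟩)
        · exact Or.inl h
        · rcases List.mem_cons.1 hpp with rfl | hpp'
          · rw [hp] at hps; cases hps
          · exact Or.inr ⟨part, hpp', hps⟩
    · dsimp only
      by_cases hin : d ∈ vs
      · rw [if_pos hin, ih]
        constructor
        · rintro (h | ⟨part, hpp, hps⟩)
          · exact Or.inl h
          · exact Or.inr ⟨part, List.mem_cons_of_mem _ hpp, hps⟩
        · rintro (h | ⟨part, hpp, hps⟩)
          · exact Or.inl h
          · rcases List.mem_cons.1 hpp with rfl | hpp'
            · rw [hp] at hps; injection hps with h'; subst h'; exact Or.inl hin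
            · exact Or.inr ⟨part, hpp', hps⟩
      · rw [if_neg hin, ih]
        constructor
        · rintro (h | ⟨part, hpp, hps⟩)
          · rcases List.mem_append.1 h with h' | h'
            · exact Or.inl h'
            · have : x = d := by simpa using h'
              subst this
              exact Or.inr ⟨p, List.mem_cons_self, hp⟩
          · exact Or.inr ⟨part, List.mem_cons_of_mem _ hpp, hps⟩
        · rintro (h | ⟨part, hpp, hps⟩)
          · exact Or.inl (List.mem_append.2 (Or.inl h))
          · rcases List.mem_cons.1 hpp with rfl | hpp'
            · rw [hp] at hps; injection hps with h'; subst h'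
              exact Or.inl (List.mem_append.2 (Or.inr (by simp)))
            · exact Or.inr ⟨part, hpp', hps⟩

theorem pvFoldA_nodup (parts : List String) (vs : List Int) (h : vs.Nodup) :
    (parts.foldl (fun values part =>
      match pvParse1 part with
      | none => values
      | some d => if d ∈ values then values else values ++ [d]) vs).Nodup := by
  induction parts generalizing vs with
  | nil => exact h
  | cons p ps ih =>
    rw [List.foldl_cons]
    apply ih
    rcases hp : pvParse1 p with _ | d
    · exact h
    · dsimp only
      by_cases hin : d ∈ vs
      · rw [if_pos hin]; exact h
      · rw [if_neg hin]
        exact List.Nodup.append h (List.nodup_singleton d) (by simp [hin])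

-- membership in B's set fold
theorem pvFoldB_mem (parts : List String) (s : PySem.Set Int) (x : Int) :
    x ∈ parts.foldl (fun parsed part =>
      match PySem.Int.ofStr? part with
      | none => parsed
      | some v => PySem.Set.add parsed v) s
    ↔ x ∈ s ∨ ∃ part ∈ parts, PySem.Int.ofStr? part = some x := by
  induction parts generalizing s with
  | nil => simp
  | cons p ps ih =>
    rw [List.foldl_cons]
    rcases hp : PySem.Int.ofStr? p with _ | v
    · dsimp only
      rw [ih]
      constructor
      · rintro (h | ⟨part, hpp, hps⟩)
        · exact Or.inl h
        · exact Or.inr ⟨part, List.mem_cons_of_mem _ hpp, hps⟩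
      · rintro (h | ⟨part, hpp, hps⟩)
        · exact Or.inl h
        · rcases List.mem_cons.1 hpp with rfl | hpp'
          · rw [hp] at hps; cases hps
          · exact Or.inr ⟨part, hpp', hps⟩
    · dsimp only
      rw [ih]
      constructor
      · rintro (h | ⟨part, hpp, hps⟩)
        · rcases (PySem.Set.mem_add s v x).1 h with h' | rfl
          · exact Or.inl h'
          · exact Or.inr ⟨p, List.mem_cons_self, hp⟩
        · exact Or.inr ⟨part, List.mem_cons_of_mem _ hpp, hps⟩
      · rintro (h | ⟨part, hpp, hps⟩)
        · exact Or.inl ((PySem.Set.mem_add s v x).2 (Or.inl h))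
        · rcases List.mem_cons.1 hpp with rfl | hpp'
          · rw [hp] at hps; injection hps with h'; subst h'
            exact Or.inl ((PySem.Set.mem_add _ _ _).2 (Or.inr rfl))
          · exact Or.inr ⟨part, hpp', hps⟩

-- ===== VERDICT (by name: the statement is the Claim_ definition above) =====
set_option maxHeartbeats 1000000 in
theorem parse_dias_activos_py_spec : Claim_equal_parse_dias_activos_py := by
  intro raw hdom
  unfold Spec_parse_dias_activos_py parse_dias_activos_py parse_dias_activos_py_alt
  have hA : (fun (values : List Int) (part : String) =>
      let item := PySem.Str.strip part
      if item = "" then values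
      else
        match PySem.Int.ofStr? item with
        | none => values
        | some day =>
          if 0 ≤ day ∧ day ≤ 6 ∧ day ∉ values then values ++ [day] else values)
      = fun values part =>
        match pvParse1 part with
        | none => values
        | some d => if d ∈ values then values else values ++ [d] :=
    funext fun values => funext fun part => pvStepA_eq values part
  set parts := (PySem.Str.split? raw ",").getD [] with hparts
  have hdomp : ∀ part ∈ parts, ∀ c ∈ part.toList, pvDomChar c = true := by
    intro part hpart c hc
    have hcraw := pvSplit_part_subset (hparts ▸ hpart) c hc
    have := hdom
    unfold Dom_parse_dias_activos_py pvDomStr at this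
    exact List.all_eq_true.mp this c hcraw
  rw [hA]
  set values := parts.foldl (fun values part =>
      match pvParse1 part with
      | none => values
      | some d => if d ∈ values then values else values ++ [d]) [] with hvalues
  set parsed := parts.foldl (fun parsed part =>
      match PySem.Int.ofStr? part with
      | none => parsed
      | some v => PySem.Set.add parsed v) PySem.Set.empty with hparsed
  have hmemv : ∀ x, x ∈ values ↔ (∃ part ∈ parts, pvParse1 part = some x) := by
    intro x; rw [hvalues, pvFoldA_mem]; simp
  have hnd : values.Nodup := pvFoldA_nodup parts [] List.nodup_nil
  have hbnd : ∀ x ∈ values, 0 ≤ x ∧ x ≤ 6 := by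
    intro x hx
    rcases (hmemv x).1 hx with ⟨part, _, hp⟩
    exact pvParse1_bounds hp
  have hmems : ∀ x, x ∈ parsed ↔ (∃ part ∈ parts, PySem.Int.ofStr? part = some x) := by
    intro x
    rw [hparsed, pvFoldB_mem]
    simp [PySem.Set.empty]
  have hfilter : (PySem.List.pyRange 0 7 1).filter (fun d => decide (d ∈ parsed))
      = (PySem.List.pyRange 0 7 1).filter (fun d => decide (d ∈ values)) := by
    apply List.filter_congr
    intro d hd
    rw [PySem.List.mem_pyRange_one] at hd
    rw [decide_eq_decide]
    rw [hmems, hmemv]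
    constructor
    · rintro ⟨part, hpp, hps⟩
      exact ⟨part, hpp,
        (pvParse1_iff_ofStr (hdomp part hpp) hd.1 (by omega)).2 hps⟩
    · rintro ⟨part, hpp, hps⟩
      exact ⟨part, hpp,
        (pvParse1_iff_ofStr (hdomp part hpp) hd.1 (by omega)).1 hps⟩
  rw [hfilter]
  apply PySem.List.sorted_eq_of_perm_of_pairwise_lt
  · apply (List.perm_ext_iff_of_nodup _ hnd).2
    · intro x
      simp only [List.mem_filter, PySem.List.mem_pyRange_one, decide_eq_true_eq]
      constructor
      · rintro ⟨_, hx⟩; exact hx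
      · intro hx; exact ⟨by have := hbnd x hx; omega, hx⟩
    · exact (PySem.List.nodup_pyRange_one 0 7).filter _
  · exact (PySem.List.pairwise_lt_pyRange_one 0 7).filter _
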